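-- pv_equiv track=rewrite | github.com/Newer-Team/NewerSMBDS | Assembly/ndspy/soundSequence.py | _length_of_variable_length_int
-- ===== SOURCE A (Python) =====
-- def _length_of_variable_length_int(x):
--     """
--     Returns the length of a variable-length integer `x`, as encoded in
--     SSEQ. See _read_variable_length_int() for a description of the format.
--     This can be implemented more concisely, but I opted for readability.
--     """
--     if x < 0:
--         raise ValueError(f'Cannot write a negative variable-length int: {x}')
--     bits = x.bit_length()
--     length = 0
--     while bits > 0:
--         length += 1
--         bits -= 7
--     return max(1, length)
-- ===== SOURCE B (Python) =====
-- def _length_of_variable_length_int(x):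
--     if x < 0:
--         raise ValueError(f'Cannot write a negative variable-length int: {x}')
--     return max(1, (x.bit_length() + 6) // 7)
-- ===== Notes on version B (the rewrite author's own statement) =====
-- stated objective: simpler
-- what changed: Replaced the while-loop that counts 7-bit groups by repeated subtraction with the closed-form ceiling division max(1, (x.bit_length() + 6) // 7).
import Mathlib
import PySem

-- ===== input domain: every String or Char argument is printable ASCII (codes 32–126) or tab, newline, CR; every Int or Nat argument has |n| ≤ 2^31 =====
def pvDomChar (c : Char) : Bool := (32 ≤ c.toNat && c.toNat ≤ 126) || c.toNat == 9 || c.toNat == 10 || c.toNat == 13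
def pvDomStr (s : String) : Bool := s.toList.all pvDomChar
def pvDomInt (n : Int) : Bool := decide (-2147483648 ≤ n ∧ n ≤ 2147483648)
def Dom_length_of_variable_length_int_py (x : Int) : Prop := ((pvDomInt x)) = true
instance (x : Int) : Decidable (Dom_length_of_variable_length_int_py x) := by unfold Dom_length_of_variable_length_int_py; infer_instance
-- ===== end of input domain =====

-- B replaces A's subtract-and-count loop with the closed form max(1, (bit_length+6)//7); simpler.

-- ===== PORT A =====
-- the 'while bits > 0: length += 1; bits -= 7' loop of A, step for step
def pvLenLoop (bits len : Nat) : Nat :=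
  if bits > 0 then pvLenLoop (bits - 7) (len + 1) else len
termination_by bits
decreasing_by omega

def length_of_variable_length_int_py (x : Int) : Int :=
  if x < 0 then 0  -- A raises ValueError here; excluded by Pre_
  else max 1 ((pvLenLoop (PySem.Int.bitLength x) 0 : Nat) : Int)

-- ===== PORT B =====
def length_of_variable_length_int_py_alt (x : Int) : Int :=
  if x < 0 then 0  -- B raises ValueError here; excluded by Pre_
  else max 1 (PySem.Int.floordiv ((PySem.Int.bitLength x : Int) + 6) 7)

-- ===== PRECONDITION & SPEC =====
-- A (and B) raise ValueError exactly on negative x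
def Pre_length_of_variable_length_int_py (x : Int) : Prop := 0 ≤ x
instance (x : Int) : Decidable (Pre_length_of_variable_length_int_py x) := by unfold Pre_length_of_variable_length_int_py; infer_instance
def pvWitness_length_of_variable_length_int_py : Int := 300

def Spec_length_of_variable_length_int_py (x : Int) (out : Int) : Prop := out = length_of_variable_length_int_py_alt x
instance (x : Int) (out : Int) : Decidable (Spec_length_of_variable_length_int_py x out) := by unfold Spec_length_of_variable_length_int_py; infer_instance

-- ===== CLAIM (what is proved, stated in full; the proofs are below) =====
def Claim_equal_length_of_variable_length_int_py : Prop := ∀ (x : Int), Dom_length_of_variable_length_int_py x → Pre_length_of_variable_length_int_py x → Spec_length_of_variable_length_int_py x (length_of_variable_length_int_py x)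

-- ===== LEMMAS AND PROOFS =====
theorem pvLenLoop_eq (bits : Nat) : ∀ acc, pvLenLoop bits acc = acc + (bits + 6) / 7 := by
  induction bits using Nat.strong_induction_on with
  | _ bits ih =>
    intro acc
    rw [pvLenLoop]
    split
    · rw [ih (bits - 7) (by omega)]
      omega
    · omega

-- ===== VERDICT (by name: the statement is the Claim_ definition above) =====
theorem length_of_variable_length_int_py_spec : Claim_equal_length_of_variable_length_int_py := by
  intro x _ hpre
  unfold Pre_length_of_variable_length_int_py at hpre
  unfold Spec_length_of_variable_length_int_py
  unfold length_of_variable_length_int_py length_of_variable_length_int_py_alt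
  rw [if_neg (by omega), if_neg (by omega)]
  have h : PySem.Int.floordiv ((PySem.Int.bitLength x : Int) + 6) 7
      = (((PySem.Int.bitLength x + 6) / 7 : Nat) : Int) := by
    have := PySem.Int.floordiv_natCast (PySem.Int.bitLength x + 6) 7
    push_cast at this ⊢
    exact this
  rw [h, pvLenLoop_eq]
  simp
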